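-- pv_equiv track=rewrite | github.com/Dedalus-Stephen/dota-fight-iq | parser-worker/worker.py | assemble_parsed_match
-- ===== SOURCE A (Python) =====
-- def assemble_parsed_match(events: list[dict]) -> dict:
--     result = {"teamfights": [], "players": [], "objectives": [], "chat": []}
--     for event in events:
--         t = event.get("type")
--         if t == "teamfight":
--             result["teamfights"].append(event)
--         elif t == "objectives":
--             result["objectives"].append(event)
--         elif t == "chat":
--             result["chat"].append(event)
--     return result
-- ===== SOURCE B (Python) =====
-- def assemble_parsed_match(events: list[dict]) -> dict:
--     return {
--         "teamfights": [e for e in events if e.get("type") == "teamfight"],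
--         "players": [],
--         "objectives": [e for e in events if e.get("type") == "objectives"],
--         "chat": [e for e in events if e.get("type") == "chat"],
--     }
-- ===== Notes on version B (the rewrite author's own statement) =====
-- stated objective: simpler
-- what changed: Replaces the mutating one-pass if/elif bucketing loop with a dict literal built from three independent filtering comprehensions (players fixed to []).
import Mathlib
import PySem

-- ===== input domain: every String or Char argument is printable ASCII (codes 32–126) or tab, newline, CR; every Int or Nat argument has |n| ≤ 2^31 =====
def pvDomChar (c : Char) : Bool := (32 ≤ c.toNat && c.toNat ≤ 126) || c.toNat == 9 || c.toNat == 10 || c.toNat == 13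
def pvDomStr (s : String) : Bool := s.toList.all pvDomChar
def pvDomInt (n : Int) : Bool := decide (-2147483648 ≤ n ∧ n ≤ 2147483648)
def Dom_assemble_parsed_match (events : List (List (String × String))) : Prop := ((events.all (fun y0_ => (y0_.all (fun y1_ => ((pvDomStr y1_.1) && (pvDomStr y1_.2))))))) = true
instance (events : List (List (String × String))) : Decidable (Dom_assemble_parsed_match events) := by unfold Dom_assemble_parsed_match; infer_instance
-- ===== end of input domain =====

-- B returns the dict literal directly, each bucket its own filtering pass (simpler decomposition; same cost).
-- ===== PORT A =====
-- event.get("type"): first-match association-list lookup (Python dict has unique keys; first match is exact)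
def pvGetType (event : List (String × String)) : Option String :=
  (event.find? (fun kv => kv.1 == "type")).map (·.2)

-- literal transliteration of A: one fold over events maintaining the three mutable buckets
def assemble_parsed_match (events : List (List (String × String))) : List (String × List (List (String × String))) :=
  let st := events.foldl (fun (st : List (List (String × String)) × List (List (String × String)) × List (List (String × String))) event =>
    let t := pvGetType event
    if t = some "teamfight" then (st.1 ++ [event], st.2.1, st.2.2)
    else if t = some "objectives" then (st.1, st.2.1 ++ [event], st.2.2)
    else if t = some "chat" then (st.1, st.2.1, st.2.2 ++ [event])
    else st) ([], [], [])
  [("teamfights", st.1), ("players", []), ("objectives", st.2.1), ("chat", st.2.2)]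

-- ===== PORT B =====
-- transliteration of B: dict literal of three independent filtering comprehensions
def assemble_parsed_match_alt (events : List (List (String × String))) : List (String × List (List (String × String))) :=
  [("teamfights", events.filter (fun e => pvGetType e = some "teamfight")),
   ("players", []),
   ("objectives", events.filter (fun e => pvGetType e = some "objectives")),
   ("chat", events.filter (fun e => pvGetType e = some "chat"))]

-- ===== PRECONDITION & SPEC =====
def Spec_assemble_parsed_match (events : List (List (String × String))) (out : List (String × List (List (String × String)))) : Prop := out = assemble_parsed_match_alt events
instance (events : List (List (String × String))) (out : List (String × List (List (String × String)))) : Decidable (Spec_assemble_parsed_match events out) := by unfold Spec_assemble_parsed_match; infer_instance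

-- ===== CLAIM (what is proved, stated in full; the proofs are below) =====
def Claim_equal_assemble_parsed_match : Prop := ∀ (events : List (List (String × String))), Dom_assemble_parsed_match events → Spec_assemble_parsed_match events (assemble_parsed_match events)

-- ===== LEMMAS AND PROOFS =====

-- ===== VERDICT (by name: the statement is the Claim_ definition above) =====
-- loop invariant: the fold appends each bucket's filter to the starting accumulators
theorem pv_fold_inv (events : List (List (String × String)))
    (tf obj ch : List (List (String × String))) :
    events.foldl (fun (st : List (List (String × String)) × List (List (String × String)) × List (List (String × String))) event =>
      let t := pvGetType event
      if t = some "teamfight" then (st.1 ++ [event], st.2.1, st.2.2)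
      else if t = some "objectives" then (st.1, st.2.1 ++ [event], st.2.2)
      else if t = some "chat" then (st.1, st.2.1, st.2.2 ++ [event])
      else st) (tf, obj, ch)
    = (tf ++ events.filter (fun e => pvGetType e = some "teamfight"),
       obj ++ events.filter (fun e => pvGetType e = some "objectives"),
       ch ++ events.filter (fun e => pvGetType e = some "chat")) := by
  induction events generalizing tf obj ch with
  | nil => simp
  | cons e es ih =>
    simp only [List.foldl_cons, List.filter_cons]
    split_ifs with h1 h2 h3 <;> simp_all

theorem assemble_parsed_match_spec : Claim_equal_assemble_parsed_match := by
  intro events _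
  unfold Spec_assemble_parsed_match assemble_parsed_match assemble_parsed_match_alt
  simp [pv_fold_inv]
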